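-- pv_equiv track=rewrite | github.com/Neo-101-zz/R2S | swfusion/dl_ndbc.py | filter_year
-- ===== SOURCE A (Python) =====
-- def filter_year(input):
--     """Filter the inputted year.
--
--     Parameters
--     ----------
--     input : str
--         Inputted string of target year.
--
--     Returns
--     -------
--     set of int
--         Return a set of str, e.g. {1997, 1999, 2000}.
--
--     """
--     if not input:
--         return set()
--     if not input.count(' '):
--         # single input
--         if not input.count('-'):
--             res = set()
--             res.add(int(input))
--         # range input
--         else:
--             begin = int(input.split('-')[0])
--             end = int(input.split('-')[1])
--             res = set([x for x in range(begin, end+1)])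
--     # hybrid input
--     else:
--         parts = input.replace('  ', ' ').split(' ')
--         res = set()
--         for part in parts:
--             temp = filter_year(part)
--             res.update(temp)
--
--     return res
-- ===== SOURCE B (Python) =====
-- def filter_year(input):
--     """Single tokenize-then-loop pass instead of the hybrid self-recursion."""
--     if not input:
--         return set()
--     if ' ' in input:
--         parts = input.replace('  ', ' ').split(' ')
--     else:
--         parts = [input]
--     res = set()
--     for part in parts:
--         if not part:
--             continue
--         if '-' in part:
--             res.update(range(int(part.split('-')[0]), int(part.split('-')[1]) + 1))
--         else:
--             res.add(int(part))
--     return res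
-- ===== Notes on version B (the rewrite author's own statement) =====
-- stated objective: simpler
-- what changed: Flattens A's self-recursive hybrid/single/range branching into one tokenize-then-loop pass: build the parts list once, then a single loop that skips empty tokens, expands dash ranges and adds single ints.
import Mathlib
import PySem

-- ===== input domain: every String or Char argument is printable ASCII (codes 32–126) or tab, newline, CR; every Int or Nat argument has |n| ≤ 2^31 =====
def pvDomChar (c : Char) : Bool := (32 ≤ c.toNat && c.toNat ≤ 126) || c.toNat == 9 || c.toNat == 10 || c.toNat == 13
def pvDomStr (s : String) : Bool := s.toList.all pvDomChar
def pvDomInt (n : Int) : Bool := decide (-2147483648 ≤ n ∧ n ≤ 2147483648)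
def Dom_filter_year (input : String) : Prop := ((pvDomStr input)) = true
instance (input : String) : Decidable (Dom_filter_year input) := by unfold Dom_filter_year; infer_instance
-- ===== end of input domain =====

-- B replaces A's self-recursive hybrid/single/range branching with one tokenize-then-loop pass (objective: simpler).

-- ===== PORT A =====
-- literal port of A; the recursion is guarded by fuel (input length + 1), which is never exhausted:
-- recursive calls only happen on parts of a split, each strictly shorter than the input.
-- int(s) is ported as (PySem.Int.ofChars? s).getD 0; Pre_ excludes the inputs where Python's int() raises.
def fyA : Nat → List Char → List Int
  | 0, _ => []
  | fuel+1, cs =>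
    if cs = [] then []
    else if PySem.Chars.count cs [' '] = 0 then
      if PySem.Chars.count cs ['-'] = 0 then
        PySem.Set.add PySem.Set.empty ((PySem.Int.ofChars? cs).getD 0)
      else
        PySem.Set.ofList (PySem.List.pyRange
          ((PySem.Int.ofChars? ((PySem.List.pyGet? (PySem.Chars.splitOn cs ['-']) 0).getD [])).getD 0)
          (((PySem.Int.ofChars? ((PySem.List.pyGet? (PySem.Chars.splitOn cs ['-']) 1).getD [])).getD 0) + 1) 1)
    else
      (PySem.Chars.splitOn (PySem.Chars.replace cs [' ', ' '] [' ']) [' ']).foldl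
        (fun res part => PySem.Set.update res (fyA fuel part)) PySem.Set.empty

def filter_year (input : String) : List Int := fyA (input.toList.length + 1) input.toList

-- ===== PORT B =====
-- loop body of B: skip empty tokens, expand dash ranges, add single ints
def fyBstep (res : PySem.Set Int) (part : List Char) : PySem.Set Int :=
  if part = [] then res
  else if PySem.Chars.isIn ['-'] part then
    PySem.Set.update res (PySem.List.pyRange
      ((PySem.Int.ofChars? ((PySem.List.pyGet? (PySem.Chars.splitOn part ['-']) 0).getD [])).getD 0)
      (((PySem.Int.ofChars? ((PySem.List.pyGet? (PySem.Chars.splitOn part ['-']) 1).getD [])).getD 0) + 1) 1)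
  else PySem.Set.add res ((PySem.Int.ofChars? part).getD 0)

def filter_year_alt (input : String) : List Int :=
  let cs := input.toList
  if cs = [] then []
  else
    (if PySem.Chars.isIn [' '] cs then
        PySem.Chars.splitOn (PySem.Chars.replace cs [' ', ' '] [' ']) [' ']
      else [cs]).foldl fyBstep PySem.Set.empty

-- ===== PRECONDITION & SPEC =====
-- a token parses: empty (skipped), or a dash range with both pieces int()-parsable, or a single int()-parsable string
def pvTokOK (p : List Char) : Bool :=
  p.isEmpty ||
    (if PySem.Chars.isIn ['-'] p then
        (PySem.Int.ofChars? ((PySem.List.pyGet? (PySem.Chars.splitOn p ['-']) 0).getD [])).isSome &&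
        (PySem.Int.ofChars? ((PySem.List.pyGet? (PySem.Chars.splitOn p ['-']) 1).getD [])).isSome
      else (PySem.Int.ofChars? p).isSome)

-- Pre_ excludes exactly the inputs on which Python's int() raises ValueError (a token, or a piece of a
-- dash-range token, that does not parse as an int); A raises there, and B raises there too.
def Pre_filter_year (input : String) : Prop :=
  (if PySem.Chars.isIn [' '] input.toList then
      PySem.Chars.splitOn (PySem.Chars.replace input.toList [' ', ' '] [' ']) [' ']
    else [input.toList]).all pvTokOK = true

instance (input : String) : Decidable (Pre_filter_year input) := by unfold Pre_filter_year; infer_instance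

def pvWitness_filter_year : String := "1997  2000-2002 1999"

def Spec_filter_year (input : String) (out : List Int) : Prop := out = filter_year_alt input
instance (input : String) (out : List Int) : Decidable (Spec_filter_year input out) := by unfold Spec_filter_year; infer_instance

-- ===== CLAIM (what is proved, stated in full; the proofs are below) =====
def Claim_equal_filter_year : Prop := ∀ (input : String), Dom_filter_year input → Pre_filter_year input → Spec_filter_year input (filter_year input)

-- ===== LEMMAS AND PROOFS =====

-- 'c in s' for a single character is list membership
lemma isIn_single_iff (c : Char) (s : List Char) : PySem.Chars.isIn [c] s = true ↔ c ∈ s := by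
  rw [PySem.Chars.isIn_iff_infix]
  constructor
  · intro h; exact h.mem (List.mem_singleton_self c)
  · intro h
    obtain ⟨t₁, t₂, rfl⟩ := List.append_of_mem h
    exact ⟨t₁, t₂, by simp⟩

lemma count_go_single (c : Char) : ∀ fuel l acc, l.length ≤ fuel →
    PySem.Chars.count.go [c] fuel l acc = acc + l.count c := by
  intro fuel
  induction fuel with
  | zero =>
    intro l acc h
    have : l = [] := List.eq_nil_of_length_eq_zero (Nat.le_zero.mp h)
    subst this; simp [PySem.Chars.count.go]
  | succ n ih =>
    intro l acc h
    cases l with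
    | nil => simp [PySem.Chars.count.go]
    | cons x t =>
      simp only [PySem.Chars.count.go]
      by_cases hx : c = x
      · subst hx
        simp only [List.isPrefixOf, BEq.rfl, Bool.true_and]
        rw [List.length_cons] at h
        rw [ih _ _ (by simpa using Nat.le_of_succ_le_succ h)]
        simp
        omega
      · have : ([c].isPrefixOf (x :: t)) = false := by
          simp [List.isPrefixOf]
          exact fun hcx => absurd hcx hx
        rw [this]
        simp only [Bool.false_eq_true, if_false]
        rw [List.length_cons] at h
        rw [ih _ _ (Nat.le_of_succ_le_succ h)]
        simp [List.count_cons]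
        intro hxc
        exact absurd hxc.symm hx

lemma count_single (s : List Char) (c : Char) : PySem.Chars.count s [c] = s.count c := by
  simp [PySem.Chars.count]
  simpa using count_go_single c s.length s 0 (le_refl _)

lemma count_single_zero_iff (s : List Char) (c : Char) :
    PySem.Chars.count s [c] = 0 ↔ c ∉ s := by
  rw [count_single]; exact List.count_eq_zero

-- every piece of a split by a single-character separator avoids that character
lemma splitOn_go_single_not_mem (c : Char) : ∀ fuel l cur acc, l.length ≤ fuel →
    c ∉ cur → (∀ q ∈ acc, c ∉ q) →
    ∀ p ∈ PySem.Chars.splitOn.go [c] fuel l cur acc, c ∉ p := by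
  intro fuel
  induction fuel with
  | zero =>
    intro l cur acc h hcur hacc p hp
    have : l = [] := List.eq_nil_of_length_eq_zero (Nat.le_zero.mp h)
    subst this
    simp only [PySem.Chars.splitOn.go, List.mem_reverse, List.mem_cons] at hp
    rcases hp with h1 | h2
    · subst h1; simp [hcur]
    · exact hacc p h2
  | succ n ih =>
    intro l cur acc h hcur hacc p hp
    cases l with
    | nil =>
      simp only [PySem.Chars.splitOn.go, List.mem_reverse, List.mem_cons] at hp
      rcases hp with h1 | h2
      · subst h1; simp [hcur]
      · exact hacc p h2
    | cons x t =>
      simp only [PySem.Chars.splitOn.go] at hp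
      by_cases hx : c = x
      · subst hx
        have hpre : ([c].isPrefixOf (c :: t)) = true := by simp [List.isPrefixOf]
        rw [if_pos hpre] at hp
        refine ih _ _ _ (by simpa using Nat.le_of_succ_le_succ (by simpa using h)) (by simp) ?_ p hp
        intro q hq
        rcases List.mem_cons.mp hq with h1 | h2
        · subst h1; simp [hcur]
        · exact hacc q h2
      · have hpre : ([c].isPrefixOf (x :: t)) = false := by
          simp [List.isPrefixOf]
          exact fun hcx => absurd hcx hx
        rw [hpre] at hp
        simp only [Bool.false_eq_true, if_false] at hp
        refine ih _ _ _ (Nat.le_of_succ_le_succ (by simpa using h)) ?_ hacc p hp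
        intro hmem
        rcases List.mem_cons.mp hmem with h1 | h2
        · exact hx h1
        · exact hcur h2

lemma splitOn_single_not_mem (c : Char) (s : List Char) :
    ∀ p ∈ PySem.Chars.splitOn s [c], c ∉ p := by
  intro p hp
  exact splitOn_go_single_not_mem c (s.length + 1) s [] [] (Nat.le_succ _) (by simp) (by simp) p hp

lemma update_ofList (r : PySem.Set Int) (l : List Int) :
    PySem.Set.update r (PySem.Set.ofList l) = PySem.Set.update r l := by
  rw [PySem.Set.update_eq_append_filter, PySem.Set.update_eq_append_filter, PySem.Set.ofList_ofList]

-- one token of B's loop = 'update with the recursive result' in A, for a space-free token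
lemma part_step (f : Nat) (p : List Char) (hsp : PySem.Chars.count p [' '] = 0) (r : PySem.Set Int) :
    PySem.Set.update r (fyA (f+1) p) = fyBstep r p := by
  unfold fyA fyBstep
  by_cases hp : p = []
  · simp [hp, PySem.Set.update_nil]
  · rw [if_neg hp, if_neg hp, if_pos hsp]
    by_cases hd : PySem.Chars.count p ['-'] = 0
    · have : PySem.Chars.isIn ['-'] p = false := by
        rw [Bool.eq_false_iff]
        intro hIn
        exact (count_single_zero_iff p '-').mp hd ((isIn_single_iff '-' p).mp hIn)
      rw [if_pos hd, this]
      simp only [Bool.false_eq_true, if_false]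
      have hadd : PySem.Set.add (PySem.Set.empty (α := Int)) ((PySem.Int.ofChars? p).getD 0)
          = [((PySem.Int.ofChars? p).getD 0)] := rfl
      rw [hadd, PySem.Set.update_cons, PySem.Set.update_nil]
    · have hmem : '-' ∈ p := by
        by_contra hnm
        exact hd ((count_single_zero_iff p '-').mpr hnm)
      have : PySem.Chars.isIn ['-'] p = true := (isIn_single_iff '-' p).mpr hmem
      rw [if_neg hd, this, if_pos rfl, update_ofList]



-- every result of the A port is duplicate-free (it is a Python set)
lemma fyA_nodup : ∀ (f : Nat) (p : List Char), (fyA f p).Nodup := by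
  intro f
  induction f with
  | zero => intro p; simp [fyA]
  | succ n ih =>
    intro p
    unfold fyA
    by_cases hp : p = []
    · simp [hp]
    · rw [if_neg hp]
      by_cases hsp : PySem.Chars.count p [' '] = 0
      · rw [if_pos hsp]
        by_cases hd : PySem.Chars.count p ['-'] = 0
        · rw [if_pos hd]; exact PySem.Set.nodup_add _ _ (by simp [PySem.Set.empty])
        · rw [if_neg hd]; exact PySem.Set.nodup_ofList _
      · rw [if_neg hsp]
        have : ∀ (l : List (List Char)) (r : PySem.Set Int), r.Nodup →
            (l.foldl (fun res part => PySem.Set.update res (fyA n part)) r).Nodup := by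
          intro l
          induction l with
          | nil => intro r hr; simpa
          | cons x xs ihl =>
            intro r hr
            exact ihl _ (PySem.Set.nodup_update _ _ hr)
        exact this _ _ (by simp [PySem.Set.empty])
-- A's space-free base case = B's loop body started from the empty set
lemma base_eq (f : Nat) (p : List Char) (hsp : PySem.Chars.count p [' '] = 0) :
    fyA (f+1) p = fyBstep PySem.Set.empty p := by
  have h := part_step f p hsp PySem.Set.empty
  rw [show (PySem.Set.empty : PySem.Set Int) = [] from rfl, PySem.Set.update_nil_left,
    PySem.Set.ofList_eq_self_of_nodup _ (fyA_nodup (f+1) p)] at h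
  exact h

-- ===== VERDICT (by name: the statement is the Claim_ definition above) =====
theorem filter_year_spec : Claim_equal_filter_year := by
  intro input _ _
  unfold Spec_filter_year filter_year filter_year_alt
  set cs := input.toList with hcs
  by_cases h0 : cs = []
  · simp [h0, fyA]
  · simp only
    by_cases hsp : PySem.Chars.isIn [' '] cs = true
    · -- hybrid: A recurses over the parts, B loops over them
      have hcnt : ¬ PySem.Chars.count cs [' '] = 0 := by
        intro hc
        exact (count_single_zero_iff cs ' ').mp hc ((isIn_single_iff ' ' cs).mp hsp)
      rw [if_neg h0, hsp, if_pos rfl]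
      unfold fyA
      rw [if_neg h0, if_neg hcnt]
      obtain ⟨k, hk⟩ : ∃ k, cs.length = k + 1 := by
        have := List.length_pos_of_ne_nil h0
        exact ⟨cs.length - 1, by omega⟩
      rw [hk]
      apply PySem.List.foldl_congr_mem
      intro acc x hx
      have hxs : ' ' ∉ x := splitOn_single_not_mem ' ' _ x hx
      exact part_step k x ((count_single_zero_iff x ' ').mpr hxs) acc
    · -- single token
      have hsp' : PySem.Chars.isIn [' '] cs = false := Bool.eq_false_iff.mpr hsp
      rw [if_neg h0, hsp']
      simp only [Bool.false_eq_true, if_false, List.foldl_cons, List.foldl_nil]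
      have hcnt : PySem.Chars.count cs [' '] = 0 := by
        rw [count_single_zero_iff]
        intro hm
        exact hsp ((isIn_single_iff ' ' cs).mpr hm)
      exact base_eq cs.length cs hcnt
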